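-- pv_equiv track=rewrite | github.com/heisje/Algorithm_Study | nimusmix/1222/방금그곡.py | melody_split
-- ===== SOURCE A (Python) =====
-- def melody_split(arr):
--     MELODY = ['C', 'C#', 'D', 'D#', 'E', 'F', 'F#', 'G', 'G#', 'A', 'A#', 'B']
--     rst = ''
--     for idx, i in enumerate(arr):
--         if not i.isalpha():
--             continue
--         # '#' 붙으면 소문자로 문자열에 저장
--         rst += i.lower() if idx != (len(arr) - 1) and arr[idx:idx+2] in MELODY else i
--     return rst
-- ===== SOURCE B (Python) =====
-- def melody_split(arr):
--     for sharp, low in (('C#', 'c'), ('D#', 'd'), ('F#', 'f'), ('G#', 'g'), ('A#', 'a')):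
--         arr = arr.replace(sharp, low)
--     return ''.join(ch for ch in arr if ch.isalpha())
-- ===== Notes on version B (the rewrite author's own statement) =====
-- stated objective: faster
-- what changed: B replaces A's single indexed lookahead pass with string += by two phases: textual replacement of the five sharp tokens ('C#'->'c', ...) via str.replace, then a filter keeping only alphabetic characters.
import Mathlib
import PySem

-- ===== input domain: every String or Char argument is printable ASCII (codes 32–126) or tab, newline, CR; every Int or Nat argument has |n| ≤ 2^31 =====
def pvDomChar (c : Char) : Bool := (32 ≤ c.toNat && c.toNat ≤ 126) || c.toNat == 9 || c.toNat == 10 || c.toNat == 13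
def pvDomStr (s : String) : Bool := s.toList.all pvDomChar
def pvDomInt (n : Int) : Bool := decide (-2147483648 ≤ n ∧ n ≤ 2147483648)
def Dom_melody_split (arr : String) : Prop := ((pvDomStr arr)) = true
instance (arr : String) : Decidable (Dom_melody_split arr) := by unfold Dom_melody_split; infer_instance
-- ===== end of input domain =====

-- B replaces A's single indexed lookahead pass by replacement of the five sharp tokens followed by an alphabetic filter (objective: faster; C-level replace/join instead of a per-char Python loop).

-- ===== PORT A =====
-- A's local constant MELODY, lifted to the top level
def MELODY_A : List (List Char) :=
  [['C'], ['C','#'], ['D'], ['D','#'], ['E'], ['F'], ['F','#'], ['G'], ['G','#'], ['A'], ['A','#'], ['B']]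

def melody_split (arr : String) : String :=
  let cs := arr.toList
  String.ofList ((PySem.List.enumerate cs).foldl
    (fun rst p =>
      if PySem.Chars.isalpha p.2 = false then rst
      else rst ++ (if p.1 ≠ (cs.length : Int) - 1 ∧ PySem.List.slice cs (some p.1) (some (p.1 + 2)) ∈ MELODY_A
                   then [PySem.Chars.lowerChar p.2] else [p.2]))
    [])

-- ===== PORT B =====
-- the five (sharp token, lowercase letter) replacement pairs of Source B
def sharpPairs : List (List Char × List Char) :=
  [(['C','#'], ['c']), (['D','#'], ['d']), (['F','#'], ['f']), (['G','#'], ['g']), (['A','#'], ['a'])]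

def melody_split_alt (arr : String) : String :=
  let t := sharpPairs.foldl (fun s p => PySem.Chars.replace s p.1 p.2) arr.toList
  String.ofList (t.filter PySem.Chars.isalpha)

-- ===== PRECONDITION & SPEC =====
def Spec_melody_split (arr : String) (out : String) : Prop := out = melody_split_alt arr
instance (arr : String) (out : String) : Decidable (Spec_melody_split arr out) := by unfold Spec_melody_split; infer_instance

-- ===== CLAIM (what is proved, stated in full; the proofs are below) =====
def Claim_equal_melody_split : Prop := ∀ (arr : String), Dom_melody_split arr → Spec_melody_split arr (melody_split arr)

-- ===== LEMMAS AND PROOFS =====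

-- one leftmost-scan replacement of the token [u,'#'] by [l] (the effect of s.replace(u+'#', l))
def rep (u l : Char) : List Char → List Char
  | x :: y :: t => if x = u ∧ y = '#' then l :: rep u l t else x :: rep u l (y :: t)
  | [x] => [x]
  | [] => []

-- simultaneous scan replacing every token [x,'#'] with x a key of m by its image
def scan (m : List (Char × Char)) : List Char → List Char
  | x :: y :: t =>
    match m.lookup x with
    | some lx => if y = '#' then lx :: scan m t else x :: scan m (y :: t)
    | none => x :: scan m (y :: t)
  | [x] => [x]
  | [] => []

-- the sharp letters with their lowercase images, in B's replacement order
def M5 : List (Char × Char) := [('C','c'), ('D','d'), ('F','f'), ('G','g'), ('A','a')]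

-- the common single-pass specification of both programs
def gspec : List Char → List Char
  | x :: y :: t =>
    (if PySem.Chars.isalpha x = true
     then [if y = '#' ∧ (M5.lookup x).isSome then PySem.Chars.lowerChar x else x] else [])
    ++ gspec (y :: t)
  | [x] => if PySem.Chars.isalpha x = true then [x] else []
  | [] => []

lemma repl_go_spec (u l : Char) :
    ∀ (fuel : Nat) (s acc : List Char), s.length ≤ fuel →
      PySem.Chars.replace.go [u,'#'] [l] fuel s acc = acc.reverse ++ rep u l s := by
  intro fuel
  induction fuel with
  | zero =>
    intro s acc h
    have : s = [] := by cases s <;> simp_all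
    subst this; simp [PySem.Chars.replace.go, rep]
  | succ n ih =>
    intro s acc h
    match s with
    | [] => simp [PySem.Chars.replace.go, rep]
    | c :: t =>
      simp only [PySem.Chars.replace.go]
      by_cases hp : [u, '#'].isPrefixOf (c :: t) = true
      · rw [if_pos hp]
        obtain ⟨c1, t', rfl⟩ : ∃ c1 t', t = c1 :: t' := by
          cases t with
          | nil => simp [List.isPrefixOf] at hp
          | cons a b => exact ⟨a, b, rfl⟩
        simp only [List.isPrefixOf, Bool.and_eq_true, beq_iff_eq] at hp
        obtain ⟨h1, h2, -⟩ := hp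
        subst h1; subst h2
        simp only [List.length_cons, List.length_nil, List.drop_succ_cons, List.drop_zero]
        rw [ih t' ([l].reverse ++ acc) (by simp at h ⊢; omega)]
        simp [rep]
      · rw [if_neg hp]
        rw [ih t (c :: acc) (by simp at h ⊢; omega)]
        cases t with
        | nil => simp [rep]
        | cons y t' =>
          have hcond : ¬ (c = u ∧ y = '#') := by
            intro hcc
            simp [List.isPrefixOf, hcc.1, hcc.2] at hp
          simp [rep, hcond]

lemma repl_eq_rep (u l : Char) (s : List Char) :
    PySem.Chars.replace s [u,'#'] [l] = rep u l s := by
  rw [PySem.Chars.replace]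
  simp only [List.isEmpty_cons]
  rw [repl_go_spec u l s.length s [] le_rfl]
  simp

lemma scan_nil (s : List Char) : scan [] s = s := by
  fun_induction scan [] s <;> simp_all [List.lookup]

lemma lookup_mem' (m : List (Char × Char)) (k v : Char) (h : m.lookup k = some v) : (k,v) ∈ m := by
  induction m with
  | nil => simp [List.lookup] at h
  | cons p t ih =>
    rw [List.lookup_cons] at h
    by_cases hk : k == p.1
    · simp [hk] at h
      simp at hk
      have : p = (k, v) := by cases p; simp_all
      rw [this]; exact List.mem_cons_self
    · simp only [hk] at h; exact List.mem_cons_of_mem _ (ih h)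

lemma rep_cons (u l x : Char) (rest : List Char) (h : x ≠ u ∨ rest.head? ≠ some '#') :
    rep u l (x :: rest) = x :: rep u l rest := by
  cases rest with
  | nil => simp [rep]
  | cons y t =>
    have : ¬ (x = u ∧ y = '#') := by rintro ⟨rfl, rfl⟩; simp at h
    simp [rep, this]

lemma scan_head_ne_hash (m : List (Char × Char)) (h5 : ∀ p ∈ m, p.2 ≠ '#')
    (y : Char) (hy : y ≠ '#') (t : List Char) :
    (scan m (y :: t)).head? ≠ some '#' := by
  cases t with
  | nil => simp [scan, hy]
  | cons z t' =>
    simp only [scan]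
    cases hl : m.lookup y with
    | none => simp [hy]
    | some ly =>
      by_cases hz : z = '#'
      · have := h5 _ (lookup_mem' _ _ _ hl)
        simp [hz, this]
      · simp [hz, hy]

lemma lookup_append_some (m m2 : List (Char × Char)) (k v : Char) (h : m.lookup k = some v) :
    (m ++ m2).lookup k = some v := by
  induction m with
  | nil => simp [List.lookup] at h
  | cons p t ih =>
    rw [List.lookup_cons] at h
    rw [List.cons_append, List.lookup_cons]
    cases hk : (k == p.1) <;> simp only [hk] at h ⊢
    · exact ih h
    · exact h

lemma lookup_append_none (m : List (Char × Char)) (u l k : Char) (h : m.lookup k = none) :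
    (m ++ [(u, l)]).lookup k = if k = u then some l else none := by
  induction m with
  | nil => rw [List.nil_append, List.lookup_cons]; cases hk : (k == u) <;> simp_all
  | cons p t ih =>
    rw [List.lookup_cons] at h
    rw [List.cons_append, List.lookup_cons]
    cases hk : (k == p.1) <;> simp only [hk] at h ⊢
    · exact ih h
    · exact absurd h (by simp)

lemma scan_cons2_some (m : List (Char × Char)) (x lx y : Char) (t : List Char)
    (h : m.lookup x = some lx) :
    scan m (x :: y :: t) = if y = '#' then lx :: scan m t else x :: scan m (y :: t) := by
  simp [scan, h]

lemma scan_cons2_none (m : List (Char × Char)) (x y : Char) (t : List Char)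
    (h : m.lookup x = none) :
    scan m (x :: y :: t) = x :: scan m (y :: t) := by
  simp [scan, h]

lemma chain (m : List (Char × Char)) (u l : Char)
    (h1 : m.lookup u = none) (h4 : m.lookup '#' = none)
    (h5 : ∀ p ∈ m, p.2 ≠ u ∧ p.2 ≠ '#') :
    ∀ s, rep u l (scan m s) = scan (m ++ [(u, l)]) s := by
  have key : ∀ (n : Nat) (s : List Char), s.length ≤ n →
      rep u l (scan m s) = scan (m ++ [(u, l)]) s := by
    intro n
    induction n with
    | zero =>
      intro s h
      have : s = [] := by cases s <;> simp_all
      subst this; simp [scan, rep]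
    | succ n ih =>
      intro s h
      match s with
      | [] => simp [scan, rep]
      | [x] => simp [scan, rep]
      | x :: y :: t =>
        cases hx : m.lookup x with
        | some lx =>
          have hx' : (m ++ [(u, l)]).lookup x = some lx := lookup_append_some _ _ _ _ hx
          have hlx1 : lx ≠ u := (h5 _ (lookup_mem' _ _ _ hx)).1
          have hxu : x ≠ u := by intro e; rw [e, h1] at hx; cases hx
          rw [scan_cons2_some _ _ _ _ _ hx, scan_cons2_some _ _ _ _ _ hx']
          by_cases hy : y = '#'
          · rw [if_pos hy, if_pos hy, rep_cons _ _ _ _ (Or.inl hlx1),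
              ih t (by simp at h ⊢; omega)]
          · rw [if_neg hy, if_neg hy, rep_cons _ _ _ _ (Or.inl hxu),
              ih (y :: t) (by simp at h ⊢; omega)]
        | none =>
          have hx2 := lookup_append_none m u l x hx
          by_cases hxu : x = u
          · rw [if_pos hxu] at hx2
            rw [scan_cons2_some _ _ _ _ _ hx2]
            by_cases hy : y = '#'
            · subst hy
              rw [if_pos rfl, scan_cons2_none _ _ _ _ hx]
              cases t with
              | nil => simp [scan, rep, hxu]
              | cons z t' =>
                rw [scan_cons2_none _ _ _ _ h4]
                simp only [rep, hxu, and_self, if_pos]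
                rw [ih (z :: t') (by simp at h ⊢; omega)]
            · rw [if_neg hy, scan_cons2_none _ _ _ _ hx,
                rep_cons _ _ _ _ (Or.inr (scan_head_ne_hash m (fun p hp => (h5 p hp).2) y hy t)),
                ih (y :: t) (by simp at h ⊢; omega)]
          · rw [if_neg hxu] at hx2
            rw [scan_cons2_none _ _ _ _ hx2, scan_cons2_none _ _ _ _ hx,
              rep_cons _ _ _ _ (Or.inl hxu), ih (y :: t) (by simp at h ⊢; omega)]
  intro s; exact key s.length s le_rfl

lemma lookup_M5_eq (x lx : Char) (h : M5.lookup x = some lx) :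
    lx = PySem.Chars.lowerChar x ∧ PySem.Chars.isalpha lx = true ∧ PySem.Chars.isalpha x = true := by
  by_cases h1 : x = 'C'; · subst h1; simp [M5, List.lookup] at h; subst h; decide
  by_cases h2 : x = 'D'; · subst h2; simp [M5, List.lookup] at h; subst h; decide
  by_cases h3 : x = 'F'; · subst h3; simp [M5, List.lookup] at h; subst h; decide
  by_cases h4 : x = 'G'; · subst h4; simp [M5, List.lookup] at h; subst h; decide
  by_cases h5 : x = 'A'; · subst h5; simp [M5, List.lookup] at h; subst h; decide
  have e1 : (x == 'C') = false := by simp [h1]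
  have e2 : (x == 'D') = false := by simp [h2]
  have e3 : (x == 'F') = false := by simp [h3]
  have e4 : (x == 'G') = false := by simp [h4]
  have e5 : (x == 'A') = false := by simp [h5]
  simp [M5, List.lookup, e1, e2, e3, e4, e5] at h

lemma gspec_hash_cons (t : List Char) : gspec ('#' :: t) = gspec t := by
  cases t with
  | nil => simp [gspec]; decide
  | cons z t' => rw [gspec]; norm_num [show PySem.Chars.isalpha '#' = false from by decide]

lemma filter_scan : ∀ (n : Nat) (s : List Char), s.length ≤ n →
    (scan M5 s).filter PySem.Chars.isalpha = gspec s := by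
  intro n
  induction n with
  | zero =>
    intro s h
    have : s = [] := by cases s <;> simp_all
    subst this; simp [scan, gspec]
  | succ n ih =>
    intro s h
    match s with
    | [] => simp [scan, gspec]
    | [x] => simp [scan, gspec]; by_cases hx : PySem.Chars.isalpha x = true <;> simp [hx]
    | x :: y :: t =>
      rw [gspec]
      cases hx : M5.lookup x with
      | some lx =>
        obtain ⟨hlow, halphal, halphax⟩ := lookup_M5_eq x lx hx
        rw [scan_cons2_some _ _ _ _ _ hx]
        by_cases hy : y = '#'
        · rw [if_pos hy]
          simp only [List.filter_cons, halphal, if_pos]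
          rw [ih t (by simp at h ⊢; omega)]
          simp [halphax, hy, hx, ← hlow, gspec_hash_cons]
        · rw [if_neg hy]
          simp only [List.filter_cons, halphax, if_pos]
          rw [ih (y :: t) (by simp at h ⊢; omega)]
          simp [halphax, hy, hx]
      | none =>
        rw [scan_cons2_none _ _ _ _ hx]
        simp only [List.filter_cons]
        rw [ih (y :: t) (by simp at h ⊢; omega)]
        by_cases hax : PySem.Chars.isalpha x = true
        · simp [hax, hx]
        · simp [hax]

lemma enumerate_cons {α : Type} (x : α) (t : List α) (s : Int) :
    PySem.List.enumerate (x :: t) s = (s, x) :: PySem.List.enumerate t (s + 1) := rfl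

lemma mem_MELODY_pair (c y : Char) :
    [c, y] ∈ MELODY_A ↔ (y = '#' ∧ (M5.lookup c).isSome) := by
  by_cases h1 : c = 'C'; · subst h1; simp [MELODY_A, M5, List.lookup] <;> tauto
  by_cases h2 : c = 'D'; · subst h2; simp [MELODY_A, M5, List.lookup] 
  by_cases h3 : c = 'F'; · subst h3; simp [MELODY_A, M5, List.lookup] 
  by_cases h4 : c = 'G'; · subst h4; simp [MELODY_A, M5, List.lookup] 
  by_cases h5 : c = 'A'; · subst h5; simp [MELODY_A, M5, List.lookup] 
  have e1 : (c == 'C') = false := by simp [h1]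
  have e2 : (c == 'D') = false := by simp [h2]
  have e3 : (c == 'F') = false := by simp [h3]
  have e4 : (c == 'G') = false := by simp [h4]
  have e5 : (c == 'A') = false := by simp [h5]
  simp [MELODY_A, M5, List.lookup, e1, e2, e3, e4, e5, h1, h2, h3, h4, h5]

lemma loopA (cs : List Char) :
    ∀ (d k : Nat) (acc : List Char), cs.length - k = d →
      (PySem.List.enumerate (cs.drop k) (k : Int)).foldl
        (fun rst p =>
          if PySem.Chars.isalpha p.2 = false then rst
          else rst ++ (if p.1 ≠ (cs.length : Int) - 1 ∧ PySem.List.slice cs (some p.1) (some (p.1 + 2)) ∈ MELODY_A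
                       then [PySem.Chars.lowerChar p.2] else [p.2]))
        acc = acc ++ gspec (cs.drop k) := by
  intro d
  induction d with
  | zero =>
    intro k acc hd
    have : cs.drop k = [] := List.drop_eq_nil_of_le (by omega)
    rw [this]; simp [PySem.List.enumerate, gspec]
  | succ d ih =>
    intro k acc hd
    have hk : k < cs.length := by omega
    have hdrop : cs.drop k = cs[k] :: cs.drop (k + 1) := List.drop_eq_getElem_cons hk
    rw [hdrop, enumerate_cons, List.foldl_cons]
    have hc1 : ((k : Int) + 1) = ((k + 1 : Nat) : Int) := by push_cast; ring
    rw [hc1, ih (k+1) _ (by omega)]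
    have hlen' : (cs.drop (k+1)).length = cs.length - (k+1) := by simp
    have hslice : PySem.List.slice cs (some (k : Int)) (some ((k : Int) + 2)) = (cs.drop k).take 2 := by
      rw [show ((k : Int) + 2) = ((k + 2 : Nat) : Int) from by push_cast; ring,
        PySem.List.slice_natCast]
      congr 1; omega
    by_cases ha : PySem.Chars.isalpha cs[k] = true
    · rw [if_neg (by simp [ha])]
      cases hrest : cs.drop (k + 1) with
      | nil =>
        rw [hrest] at hlen'
        have hcond : ¬ ((k : Int) ≠ (cs.length : Int) - 1 ∧ PySem.List.slice cs (some (k : Int)) (some ((k : Int) + 2)) ∈ MELODY_A) := by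
          rintro ⟨hne, -⟩; apply hne
          simp at hlen'; omega
        rw [if_neg hcond]
        simp [gspec, ha]
      | cons y t' =>
        rw [hrest] at hlen'
        have hlen2 : k + 2 ≤ cs.length := by simp at hlen'; omega
        have htake : (cs.drop k).take 2 = [cs[k], y] := by
          rw [hdrop, hrest]; rfl
        have hne : (k : Int) ≠ (cs.length : Int) - 1 := by omega
        simp only [gspec, ha, if_pos, hslice, htake]
        by_cases hcond : y = '#' ∧ (M5.lookup cs[k]).isSome
        · rw [if_pos ⟨hne, (mem_MELODY_pair _ _).mpr hcond⟩, if_pos hcond]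
          simp
        · rw [if_neg (by rintro ⟨-, hm⟩; exact hcond ((mem_MELODY_pair _ _).mp hm)), if_neg hcond]
          simp
    · simp only [Bool.not_eq_true] at ha
      rw [if_pos ha]
      cases hrest : cs.drop (k + 1) with
      | nil => simp [gspec, ha]
      | cons y t' => simp only [gspec, ha]; simp

-- ===== VERDICT (by name: the statement is the Claim_ definition above) =====
theorem melody_split_spec : Claim_equal_melody_split := by
  intro arr _
  unfold Spec_melody_split
  simp only [melody_split, melody_split_alt, sharpPairs, List.foldl_cons, List.foldl_nil]
  rw [repl_eq_rep, repl_eq_rep, repl_eq_rep, repl_eq_rep, repl_eq_rep]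
  have b1 := chain [] 'C' 'c' rfl rfl (by simp) arr.toList
  rw [scan_nil] at b1
  have b2 := chain [('C','c')] 'D' 'd' (by decide) (by decide) (by decide) arr.toList
  have b3 := chain [('C','c'),('D','d')] 'F' 'f' (by decide) (by decide) (by decide) arr.toList
  have b4 := chain [('C','c'),('D','d'),('F','f')] 'G' 'g' (by decide) (by decide) (by decide) arr.toList
  have b5 := chain [('C','c'),('D','d'),('F','f'),('G','g')] 'A' 'a' (by decide) (by decide) (by decide) arr.toList
  simp only [List.nil_append, List.cons_append] at b1 b2 b3 b4 b5
  rw [b1, b2, b3, b4, b5]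
  have hB := filter_scan (arr.toList.length) arr.toList le_rfl
  rw [show ([('C','c'),('D','d'),('F','f'),('G','g'),('A','a')] : List (Char × Char)) = M5 from rfl] at *
  rw [hB]
  have hA := loopA arr.toList arr.toList.length 0 [] (by omega)
  simp only [List.drop_zero, Nat.cast_zero, List.nil_append] at hA
  rw [hA]
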